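-- pv_equiv track=rewrite | github.com/hjwnu/Algorithm | 프로그래머스/1/159994. 카드 뭉치/카드 뭉치.py | solution
-- ===== SOURCE A (Python) =====
-- def solution(cards1, cards2, goal):
--     count = 0
--     for str_ in goal:
--         if len(cards1) > 0 and cards1[0] == str_:
--             cards1.pop(0)
--             count += 1
--         if len(cards2) > 0 and cards2[0] == str_:
--             cards2.pop(0)
--             count += 1
--     return "Yes" if count==len(goal) else "No"
-- ===== SOURCE B (Python) =====
-- def solution(cards1, cards2, goal):
--     i = 0
--     for w in goal:
--         if i < len(cards1) and cards1[i] == w: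
--             i += 1
--     j = 0
--     for w in goal:
--         if j < len(cards2) and cards2[j] == w:
--             j += 1
--     return "Yes" if i + j == len(goal) else "No"
-- ===== Notes on version B (the rewrite author's own statement) =====
-- stated objective: alternative
-- what changed: Replaces A's single interleaved loop that destructively pops from both decks with two independent non-mutating pointer passes over goal, one per deck, summing the two match counts.
import Mathlib
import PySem

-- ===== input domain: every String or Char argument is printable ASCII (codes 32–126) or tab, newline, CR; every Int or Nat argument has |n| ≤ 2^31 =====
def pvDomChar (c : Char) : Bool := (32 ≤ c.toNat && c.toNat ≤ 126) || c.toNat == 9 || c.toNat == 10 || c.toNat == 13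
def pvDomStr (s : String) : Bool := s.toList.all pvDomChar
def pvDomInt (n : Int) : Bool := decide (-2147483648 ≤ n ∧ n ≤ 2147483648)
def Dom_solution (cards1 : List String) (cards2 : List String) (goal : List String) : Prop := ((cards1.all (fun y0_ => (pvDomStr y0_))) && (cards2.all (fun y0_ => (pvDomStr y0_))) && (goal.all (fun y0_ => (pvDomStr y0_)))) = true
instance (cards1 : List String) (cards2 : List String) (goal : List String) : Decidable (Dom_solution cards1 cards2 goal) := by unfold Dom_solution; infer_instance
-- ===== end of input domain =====

-- B replaces A's single interleaved loop (which pops from both decks) with two independent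
-- non-mutating pointer passes over goal, one per deck; equivalence is about the RETURN value only
-- (Python A mutates cards1/cards2 in place, B does not).

-- ===== PORT A =====
-- A's loop: for each word of goal, pop from cards1 on a head match, then from cards2, counting.
def solutionGoA : List String → List String → List String → Nat → Nat
  | [], _, _, count => count
  | s :: rest, c1, c2, count =>
    let p1 : List String × Nat :=
      match c1 with
      | x :: xs => if x = s then (xs, count + 1) else (c1, count)
      | [] => (c1, count)
    let p2 : List String × Nat :=
      match c2 with
      | y :: ys => if y = s then (ys, p1.2 + 1) else (c2, p1.2)
      | [] => (c2, p1.2)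
    solutionGoA rest p1.1 p2.1 p2.2

def solution (cards1 : List String) (cards2 : List String) (goal : List String) : String :=
  if solutionGoA goal cards1 cards2 0 = goal.length then "Yes" else "No"

-- ===== PORT B =====
-- B's pass: advance a pointer i into cards when cards[i] matches the current goal word.
def solutionPtr (cards : List String) (goal : List String) : Nat :=
  goal.foldl (fun i w => if cards[i]? = some w then i + 1 else i) 0

def solution_alt (cards1 : List String) (cards2 : List String) (goal : List String) : String :=
  if solutionPtr cards1 goal + solutionPtr cards2 goal = goal.length then "Yes" else "No"

-- ===== PRECONDITION & SPEC =====
def Spec_solution (cards1 : List String) (cards2 : List String) (goal : List String) (out : String) : Prop := out = solution_alt cards1 cards2 goal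
instance (cards1 : List String) (cards2 : List String) (goal : List String) (out : String) : Decidable (Spec_solution cards1 cards2 goal out) := by unfold Spec_solution; infer_instance

-- ===== CLAIM (what is proved, stated in full; the proofs are below) =====
def Claim_equal_solution : Prop := ∀ (cards1 : List String) (cards2 : List String) (goal : List String), Dom_solution cards1 cards2 goal → Spec_solution cards1 cards2 goal (solution cards1 cards2 goal)

-- ===== LEMMAS AND PROOFS =====

-- single-deck pop-style count (proof-only characterisation of one deck's contribution)
def popCnt : List String → List String → Nat
  | [], _ => 0
  | s :: rest, c =>
    match c with
    | x :: xs => if x = s then 1 + popCnt rest xs else popCnt rest c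
    | [] => popCnt rest c

theorem popCnt_nil (goal : List String) : popCnt goal [] = 0 := by
  induction goal with
  | nil => rfl
  | cons s rest ih => simpa [popCnt] using ih

-- A's interleaved loop splits into the two independent pop-counts
theorem goA_split (goal : List String) : ∀ (c1 c2 : List String) (count : Nat),
    solutionGoA goal c1 c2 count = count + popCnt goal c1 + popCnt goal c2 := by
  induction goal with
  | nil => intro c1 c2 count; simp [solutionGoA, popCnt]
  | cons s rest ih =>
    intro c1 c2 count
    cases c1 with
    | nil =>
      cases c2 with
      | nil => simp [solutionGoA, popCnt, ih]
      | cons y ys =>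
        by_cases hy : y = s <;> (simp [solutionGoA, popCnt, hy, ih]; try omega)
    | cons x xs =>
      cases c2 with
      | nil =>
        by_cases hx : x = s <;> (simp [solutionGoA, popCnt, hx, ih]; try omega)
      | cons y ys =>
        by_cases hx : x = s <;> by_cases hy : y = s <;>
          simp [solutionGoA, popCnt, hx, hy, ih] <;> omega

-- B's pointer pass equals the pop-count on the remaining suffix
theorem ptr_drop (cards : List String) : ∀ (goal : List String) (i : Nat), i ≤ cards.length →
    goal.foldl (fun i w => if cards[i]? = some w then i + 1 else i) i
      = i + popCnt goal (cards.drop i) := by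
  intro goal
  induction goal with
  | nil => intro i hi; simp [popCnt]
  | cons s rest ih =>
    intro i hi
    rcases lt_or_eq_of_le hi with hlt | heq
    · have hdrop := List.drop_eq_getElem_cons hlt
      have hget : cards[i]? = some cards[i] := List.getElem?_eq_getElem hlt
      by_cases hx : cards[i] = s
      · have h1 : i + 1 ≤ cards.length := hlt
        have hstep : (if cards[i]? = some s then i + 1 else i) = i + 1 := by simp [hget, hx]
        simp only [List.foldl_cons, hstep]
        rw [ih (i + 1) h1, hdrop]
        simp [popCnt, hx]
        omega
      · have : (if cards[i]? = some s then i + 1 else i) = i := by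
          simp [hget, hx]
        simp only [List.foldl_cons, this]
        rw [ih i hi, hdrop]
        simp [popCnt, hx]
    · subst heq
      have hget : cards[cards.length]? = none := by simp
      have hstep : (if cards[cards.length]? = some s then cards.length + 1 else cards.length) = cards.length := by simp
      simp only [List.foldl_cons, hstep]
      rw [ih cards.length le_rfl]
      simp [popCnt_nil]

theorem ptr_eq_popCnt (cards goal : List String) : solutionPtr cards goal = popCnt goal cards := by
  have := ptr_drop cards goal 0 (Nat.zero_le _)
  simpa [solutionPtr] using this

-- ===== VERDICT (by name: the statement is the Claim_ definition above) =====
theorem solution_spec : Claim_equal_solution := by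
  intro cards1 cards2 goal _
  unfold Spec_solution solution solution_alt
  rw [goA_split, ptr_eq_popCnt, ptr_eq_popCnt]
  simp
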